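-- pv_equiv track=rewrite | github.com/cov-lineages/scorpio | scorpio/scripts/type_constellations.py | get_number_switches
-- ===== SOURCE A (Python) =====
-- def get_number_switches(barcode_list, ref_char="-", ambig_char = "X"):
--     previous = None
--     current = None
--     number_switches = 0
--     len_non_ambig_barcode = 0
--     for letter in barcode_list:
--         if letter == ref_char:
--             current = 1
--         elif letter == ambig_char:
--             continue
--         else:
--             current = 0
--
--         len_non_ambig_barcode += 1
--
--         if previous == None:
--             previous = current
--             continue
--
--         if current != previous:
--             number_switches += 1
--             previous = current
--
--     if number_switches > 1:
--         number_switches -= 1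
--
--     return number_switches,len_non_ambig_barcode
-- ===== SOURCE B (Python) =====
-- from itertools import groupby
--
--
-- def get_number_switches(barcode_list, ref_char="-", ambig_char="X"):
--     # map each kept letter to 1 (ref) / 0 (other); a letter equal to ref_char is
--     # kept even if it also equals ambig_char, matching the branch order of the spec
--     vals = [1 if letter == ref_char else 0
--             for letter in barcode_list
--             if letter == ref_char or letter != ambig_char]
--     groups = sum(1 for _ in groupby(vals))
--     number_switches = groups - 1 if groups else 0
--     if number_switches > 1:
--         number_switches -= 1
--     return number_switches, len(vals)
-- ===== Notes on version B (the rewrite author's own statement) =====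
-- stated objective: idiomatic
-- what changed: Replaces the stateful previous/current loop with a filter-map to a 0/1 list followed by an itertools.groupby run count (switches = runs - 1), keeping the >1 decrement.
import Mathlib
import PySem

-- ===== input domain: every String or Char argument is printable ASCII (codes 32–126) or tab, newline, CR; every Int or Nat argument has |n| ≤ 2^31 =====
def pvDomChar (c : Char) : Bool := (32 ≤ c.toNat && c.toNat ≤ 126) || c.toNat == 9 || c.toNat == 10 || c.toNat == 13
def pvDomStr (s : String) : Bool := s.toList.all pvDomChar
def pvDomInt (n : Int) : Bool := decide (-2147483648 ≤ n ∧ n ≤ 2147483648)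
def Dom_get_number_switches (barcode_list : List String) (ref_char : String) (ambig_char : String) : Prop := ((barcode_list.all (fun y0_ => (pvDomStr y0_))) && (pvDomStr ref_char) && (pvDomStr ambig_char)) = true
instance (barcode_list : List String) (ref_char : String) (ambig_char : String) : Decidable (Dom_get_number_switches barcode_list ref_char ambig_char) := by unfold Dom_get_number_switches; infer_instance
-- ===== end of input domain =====

-- B replaces A's stateful previous/current loop by a filter-map to a 0/1 list plus a groupby run count (same cost, more idiomatic).
-- ===== PORT A =====
-- loop of A: state = (previous : Option Int, number_switches, len_non_ambig_barcode)
def pvGoA (ref_char ambig_char : String) : List String → Option Int → Int → Int → Int × Int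
  | [], _, sw, len => (sw, len)
  | letter :: rest, previous, sw, len =>
    if letter = ref_char then
      match previous with
      | none => pvGoA ref_char ambig_char rest (some 1) sw (len + 1)
      | some p =>
        if (1 : Int) ≠ p then pvGoA ref_char ambig_char rest (some 1) (sw + 1) (len + 1)
        else pvGoA ref_char ambig_char rest previous sw (len + 1)
    else if letter = ambig_char then
      pvGoA ref_char ambig_char rest previous sw len
    else
      match previous with
      | none => pvGoA ref_char ambig_char rest (some 0) sw (len + 1)
      | some p =>
        if (0 : Int) ≠ p then pvGoA ref_char ambig_char rest (some 0) (sw + 1) (len + 1)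
        else pvGoA ref_char ambig_char rest previous sw (len + 1)

def get_number_switches (barcode_list : List String) (ref_char : String) (ambig_char : String) : Int × Int :=
  let r := pvGoA ref_char ambig_char barcode_list none 0 0
  ((if r.1 > 1 then r.1 - 1 else r.1), r.2)

-- ===== PORT B =====
-- number of groupby groups of a list (run count)
def pvRuns : List Int → Int
  | [] => 0
  | [_] => 1
  | x :: y :: rest => (if x = y then 0 else 1) + pvRuns (y :: rest)

def get_number_switches_alt (barcode_list : List String) (ref_char : String) (ambig_char : String) : Int × Int :=
  let vals := (barcode_list.filter (fun letter => letter == ref_char || letter != ambig_char)).map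
      (fun letter => if letter = ref_char then (1 : Int) else 0)
  let groups := pvRuns vals
  let number_switches := if groups ≠ 0 then groups - 1 else 0
  ((if number_switches > 1 then number_switches - 1 else number_switches), (vals.length : Int))

-- ===== PRECONDITION & SPEC =====
def Spec_get_number_switches (barcode_list : List String) (ref_char : String) (ambig_char : String) (out : Int × Int) : Prop := out = get_number_switches_alt barcode_list ref_char ambig_char
instance (barcode_list : List String) (ref_char : String) (ambig_char : String) (out : Int × Int) : Decidable (Spec_get_number_switches barcode_list ref_char ambig_char out) := by unfold Spec_get_number_switches; infer_instance

-- ===== CLAIM (what is proved, stated in full; the proofs are below) =====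
def Claim_equal_get_number_switches : Prop := ∀ (barcode_list : List String) (ref_char : String) (ambig_char : String), Dom_get_number_switches barcode_list ref_char ambig_char → Spec_get_number_switches barcode_list ref_char ambig_char (get_number_switches barcode_list ref_char ambig_char)

-- ===== LEMMAS AND PROOFS =====

-- switches still to come, given the pending `previous` state and the remaining 0/1 values
def pvS (previous : Option Int) (vs : List Int) : Int :=
  match previous with
  | none => (match vs with | [] => 0 | _ => pvRuns vs - 1)
  | some p => pvRuns (p :: vs) - 1

theorem pvRuns_cons_cons (x y : Int) (t : List Int) :
    pvRuns (x :: y :: t) = (if x = y then 0 else 1) + pvRuns (y :: t) := rfl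

theorem pvS_none_cons (c : Int) (vs : List Int) : pvS none (c :: vs) = pvS (some c) vs := by
  simp [pvS]

theorem pvS_some_cons (p c : Int) (vs : List Int) :
    pvS (some p) (c :: vs) = (if c ≠ p then 1 else 0) + pvS (some c) vs := by
  simp only [pvS, pvRuns_cons_cons]
  by_cases h : p = c <;> simp [h, eq_comm]

theorem pvRuns_pos (v : Int) (vs : List Int) : 1 ≤ pvRuns (v :: vs) := by
  induction vs generalizing v with
  | nil => simp [pvRuns]
  | cons y t ih => rw [pvRuns_cons_cons]; have := ih y; split_ifs <;> omega

theorem pvGoA_eq (ref_char ambig_char : String) (l : List String)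
    (previous : Option Int) (sw len : Int) :
    pvGoA ref_char ambig_char l previous sw len =
      (sw + pvS previous ((l.filter (fun letter => letter == ref_char || letter != ambig_char)).map
          (fun letter => if letter = ref_char then (1 : Int) else 0)),
       len + ((l.filter (fun letter => letter == ref_char || letter != ambig_char)).length : Int)) := by
  induction l generalizing previous sw len with
  | nil => cases previous <;> simp [pvGoA, pvS, pvRuns]
  | cons letter rest ih =>
    by_cases hr : letter = ref_char
    · subst hr
      have hf : (letter == letter || letter != ambig_char) = true := by simp
      cases previous with
      | none =>
        simp only [pvGoA, ih, List.filter_cons, hf, if_true, List.map_cons,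
          List.length_cons, pvS_none_cons]
        all_goals (simp only [Prod.mk.injEq]; constructor <;> push_cast <;> ring)
      | some p =>
        by_cases hp : (1 : Int) ≠ p
        · simp only [pvGoA, if_pos hp, ih, List.filter_cons, hf, if_true,
            List.map_cons, List.length_cons, pvS_some_cons,
            ne_eq, if_true]
          all_goals (simp only [Prod.mk.injEq]; constructor <;> push_cast <;> ring)
        · push Not at hp
          subst hp
          simp only [pvGoA, ne_eq, not_true_eq_false, if_false, ih, List.filter_cons, hf,
            if_true, List.map_cons, List.length_cons, pvS_some_cons]
          all_goals (simp only [Prod.mk.injEq]; constructor <;> push_cast <;> ring)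
    · by_cases ha : letter = ambig_char
      · subst ha
        have hf : (letter == ref_char || letter != letter) = false := by simp [hr]
        simp [pvGoA, hr, ih]
      · have hf : (letter == ref_char || letter != ambig_char) = true := by simp [ha]
        cases previous with
        | none =>
          simp only [pvGoA, if_neg ha, ih, List.filter_cons, hf, if_true,
            List.map_cons, List.length_cons, if_neg hr, pvS_none_cons]
          all_goals (simp only [Prod.mk.injEq]; constructor <;> push_cast <;> ring)
        | some p =>
          by_cases hp : (0 : Int) ≠ p
          · simp only [pvGoA, if_neg ha, if_pos hp, ih, List.filter_cons, hf,
              if_true, List.map_cons, List.length_cons, if_neg hr, pvS_some_cons,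
              ne_eq, if_true]
            all_goals (simp only [Prod.mk.injEq]; constructor <;> push_cast <;> ring)
          · push Not at hp
            subst hp
            simp only [pvGoA, ne_eq, not_true_eq_false, if_false, ih, List.filter_cons, hf,
              if_true, List.map_cons, List.length_cons, if_neg hr, if_neg ha, pvS_some_cons]
            all_goals (simp only [Prod.mk.injEq]; constructor <;> push_cast <;> ring)

-- ===== VERDICT (by name: the statement is the Claim_ definition above) =====
theorem get_number_switches_spec : Claim_equal_get_number_switches := by
  intro barcode_list ref_char ambig_char _
  unfold Spec_get_number_switches get_number_switches get_number_switches_alt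
  rw [pvGoA_eq]
  cases h : (barcode_list.filter (fun letter => letter == ref_char || letter != ambig_char)).map
      (fun letter => if letter = ref_char then (1 : Int) else 0) with
  | nil =>
    have hlen : (barcode_list.filter (fun letter => letter == ref_char || letter != ambig_char)).length = 0 := by
      have := congrArg List.length h; simpa using this
    simp [hlen, pvS, pvRuns]
  | cons v vs =>
    have hlen : ((barcode_list.filter (fun letter => letter == ref_char || letter != ambig_char)).length : Int)
        = ((v :: vs).length : Int) := by rw [← h]; simp
    have hpos := pvRuns_pos v vs
    have hne : pvRuns (v :: vs) ≠ 0 := by omega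
    simp [hlen, pvS, hne]
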